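-- pv_equiv track=rewrite | github.com/anbaoxu1/STQA_Project | bert_train_test_template.py | restore_keywords_from_query
-- ===== SOURCE A (Python) =====
-- def restore_keywords_from_query(query, slots):
--     keywords = []
--     current_tokens = []
--     current_label = None
--     query = list(query)
--     if slots[0] == '[CLS]':
--         slots = slots[1:-1]
--
--     for token, slot in zip(query, slots):
--         if slot.startswith('B-'):
--             if current_tokens:
--                 keywords.append((''.join(current_tokens), current_label))
--                 current_tokens = []
--             current_label = slot[2:]
--             current_tokens.append(token)
--         elif slot.startswith('I-') and current_label == slot[2:]:
--             current_tokens.append(token)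
--         else:
--             if current_tokens:
--                 keywords.append((''.join(current_tokens), current_label))
--                 current_tokens = []
--                 current_label = None
--
--     if current_tokens:
--         keywords.append((''.join(current_tokens), current_label))
--
--     return keywords
-- ===== SOURCE B (Python) =====
-- def restore_keywords_from_query(query, slots):
--     if slots[0] == '[CLS]':
--         slots = slots[1:-1]
--     pairs = list(zip(query, slots))
--     n = len(pairs)
--     keywords = []
--     i = 0
--     while i < n:
--         token, slot = pairs[i]
--         if slot.startswith('B-'):
--             label = slot[2:]
--             tokens = [token]
--             j = i + 1
--             while j < n and pairs[j][1].startswith('I-') and pairs[j][1][2:] == label: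
--                 tokens.append(pairs[j][0])
--                 j += 1
--             keywords.append((''.join(tokens), label))
--             i = j
--         else:
--             i += 1
--     return keywords
-- ===== Notes on version B (the rewrite author's own statement) =====
-- stated objective: alternative
-- what changed: Replaces A's single flat pass carrying current_tokens/current_label state across iterations with a nested-loop span extractor: an outer index loop finds each 'B-' start and an inner while-loop collects the matching 'I-' continuation tokens, emitting each keyword locally.
import Mathlib
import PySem

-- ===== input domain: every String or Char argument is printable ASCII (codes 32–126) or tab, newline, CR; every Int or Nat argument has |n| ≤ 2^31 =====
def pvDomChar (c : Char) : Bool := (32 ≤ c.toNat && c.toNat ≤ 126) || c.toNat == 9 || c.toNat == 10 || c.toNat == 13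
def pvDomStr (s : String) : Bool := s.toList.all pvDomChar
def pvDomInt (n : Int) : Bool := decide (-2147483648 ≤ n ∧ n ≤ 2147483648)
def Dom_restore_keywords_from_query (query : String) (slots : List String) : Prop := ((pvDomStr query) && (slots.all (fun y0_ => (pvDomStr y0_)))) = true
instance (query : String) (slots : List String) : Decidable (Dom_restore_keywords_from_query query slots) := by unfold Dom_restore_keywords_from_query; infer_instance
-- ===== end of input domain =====

-- B groups BIO slots by locating each 'B-' span with a nested inner scan (index i jumping over the
-- whole span) instead of A's single flat pass carrying current_tokens/current_label; objective:
-- alternative decomposition, same cost.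

-- ===== PORT A =====
-- state = (keywords, current_tokens, current_label); current_label.getD "" is only read when
-- current_tokens ≠ [], where the Python guarantees current_label is a string (never None).
def pvStepA (st : List (String × String) × List Char × Option String) (p : Char × String) :
    List (String × String) × List Char × Option String :=
  if PySem.Str.startswith p.2 "B-" = true then
    ((if st.2.1 ≠ [] then st.1 ++ [(String.ofList st.2.1, st.2.2.getD "")] else st.1),
      [p.1], some (PySem.Str.slice p.2 (some 2) none))
  else if PySem.Str.startswith p.2 "I-" = true ∧ st.2.2 = some (PySem.Str.slice p.2 (some 2) none) then
    (st.1, st.2.1 ++ [p.1], st.2.2)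
  else if st.2.1 ≠ [] then (st.1 ++ [(String.ofList st.2.1, st.2.2.getD "")], [], none)
  else st

def pvFinishA (st : List (String × String) × List Char × Option String) : List (String × String) :=
  if st.2.1 ≠ [] then st.1 ++ [(String.ofList st.2.1, st.2.2.getD "")] else st.1

-- slots[0] raises IndexError on empty slots: excluded by Pre_; the getD default is never compared.
def restore_keywords_from_query (query : String) (slots : List String) : List (String × String) :=
  let slots' := if PySem.List.pyGetD slots 0 "" = "[CLS]"
                then PySem.List.slice slots (some 1) (some (-1)) else slots
  pvFinishA ((query.toList.zip slots').foldl pvStepA ([], [], none))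

-- ===== PORT B =====
-- inner while loop of Source B: collect tokens of the following 'I-'+label entries, return them with the rest
def pvSpanB (lbl : String) : List (Char × String) → List Char × List (Char × String)
  | [] => ([], [])
  | p :: rest =>
    if PySem.Str.startswith p.2 "I-" = true ∧ PySem.Str.slice p.2 (some 2) none = lbl then
      ((pvSpanB lbl rest).1.cons p.1, (pvSpanB lbl rest).2)
    else ([], p :: rest)

theorem pvSpanB_len (lbl : String) : ∀ l : List (Char × String), (pvSpanB lbl l).2.length ≤ l.length := by
  intro l
  induction l with
  | nil => simp [pvSpanB]
  | cons p rest ih =>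
    simp only [pvSpanB]
    split
    · exact Nat.le_succ_of_le ih
    · simp

-- outer while loop over pairs
def pvGoB : List (Char × String) → List (String × String)
  | [] => []
  | p :: rest =>
    if PySem.Str.startswith p.2 "B-" = true then
      (String.ofList (p.1 :: (pvSpanB (PySem.Str.slice p.2 (some 2) none) rest).1),
        PySem.Str.slice p.2 (some 2) none) ::
      pvGoB (pvSpanB (PySem.Str.slice p.2 (some 2) none) rest).2
    else pvGoB rest
  termination_by l => l.length
  decreasing_by
  · exact Nat.lt_succ_of_le (pvSpanB_len _ rest)
  · simp

def restore_keywords_from_query_alt (query : String) (slots : List String) : List (String × String) :=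
  let slots' := if PySem.List.pyGetD slots 0 "" = "[CLS]"
                then PySem.List.slice slots (some 1) (some (-1)) else slots
  pvGoB (query.toList.zip slots')

-- ===== PRECONDITION & SPEC =====
-- Pre_ excludes only slots = [], where Python A (and B) raise IndexError on slots[0].
def Pre_restore_keywords_from_query (query : String) (slots : List String) : Prop := slots ≠ []
instance (query : String) (slots : List String) : Decidable (Pre_restore_keywords_from_query query slots) := by
  unfold Pre_restore_keywords_from_query; infer_instance

def pvWitness_restore_keywords_from_query : String × List String := ("ab", ["B-x", "I-x"])

def Spec_restore_keywords_from_query (query : String) (slots : List String) (out : List (String × String)) : Prop := out = restore_keywords_from_query_alt query slots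
instance (query : String) (slots : List String) (out : List (String × String)) : Decidable (Spec_restore_keywords_from_query query slots out) := by unfold Spec_restore_keywords_from_query; infer_instance

-- ===== CLAIM (what is proved, stated in full; the proofs are below) =====
def Claim_equal_restore_keywords_from_query : Prop := ∀ (query : String) (slots : List String), Dom_restore_keywords_from_query query slots → Pre_restore_keywords_from_query query slots → Spec_restore_keywords_from_query query slots (restore_keywords_from_query query slots)

-- ===== LEMMAS AND PROOFS =====

theorem pvBnotI (l : List Char) (h : PySem.Chars.startswith l ['B', '-'] = true) :
    ¬ PySem.Chars.startswith l ['I', '-'] = true := by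
  intro hI
  rw [PySem.Chars.startswith_iff] at h hI
  obtain ⟨t1, e1⟩ := h
  obtain ⟨t2, e2⟩ := hI
  rw [← e1] at e2
  simp at e2

theorem pvMain (l : List (Char × String)) :
    (∀ kw, pvFinishA (l.foldl pvStepA (kw, [], none)) = kw ++ pvGoB l) ∧
    (∀ kw cur lbl, cur ≠ [] →
      pvFinishA (l.foldl pvStepA (kw, cur, some lbl)) =
        (kw ++ [(String.ofList (cur ++ (pvSpanB lbl l).1), lbl)]) ++ pvGoB (pvSpanB lbl l).2) := by
  induction l with
  | nil =>
    constructor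
    · intro kw; simp [pvFinishA, pvGoB]
    · intro kw cur lbl hcur; simp [pvFinishA, pvGoB, pvSpanB, hcur]
  | cons p rest ih =>
    obtain ⟨ihn, ihs⟩ := ih
    constructor
    · intro kw
      by_cases hB : PySem.Chars.startswith p.2.toList ['B', '-'] = true
      · have hstep : pvStepA (kw, [], none) p
            = (kw, [p.1], some (PySem.Str.slice p.2 (some 2) none)) := by
          simp [pvStepA, hB]
        rw [List.foldl_cons, hstep, ihs kw [p.1] _ (by simp)]
        rw [pvGoB]
        simp [hB]
      · have hstep : pvStepA (kw, [], none) p = (kw, [], none) := by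
          simp [pvStepA, hB]
        rw [List.foldl_cons, hstep, ihn kw]
        rw [pvGoB]
        simp [hB]
    · intro kw cur lbl hcur
      by_cases hB : PySem.Chars.startswith p.2.toList ['B', '-'] = true
      · -- span ends, a new B- span starts
        have hnI : ¬ PySem.Chars.startswith p.2.toList ['I', '-'] = true := pvBnotI _ hB
        have hstep : pvStepA (kw, cur, some lbl) p
            = (kw ++ [(String.ofList cur, lbl)], [p.1], some (PySem.Str.slice p.2 (some 2) none)) := by
          simp [pvStepA, hB, hcur]
        have hspan : pvSpanB lbl (p :: rest) = ([], p :: rest) := by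
          simp [pvSpanB, hnI]
        rw [List.foldl_cons, hstep, ihs _ [p.1] _ (by simp), hspan]
        rw [pvGoB]
        simp [hB]
      · by_cases hI : PySem.Chars.startswith p.2.toList ['I', '-'] = true ∧ PySem.Str.slice p.2 (some 2) none = lbl
        · -- span continues
          have h2 : lbl = PySem.Str.slice p.2 (some 2) none := hI.2.symm
          have hstep : pvStepA (kw, cur, some lbl) p = (kw, cur ++ [p.1], some lbl) := by
            simp [pvStepA, hB, hI.1, h2]
          have hspan : pvSpanB lbl (p :: rest)
              = ((pvSpanB lbl rest).1.cons p.1, (pvSpanB lbl rest).2) := by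
            simp [pvSpanB, hI.1, hI.2]
          rw [List.foldl_cons, hstep, ihs kw (cur ++ [p.1]) lbl (by simp), hspan]
          simp
        · -- span ends, element skipped
          have hnotI : ¬ (PySem.Chars.startswith p.2.toList ['I', '-'] = true ∧ lbl = PySem.Str.slice p.2 (some 2) none) := by
            intro h; exact hI ⟨h.1, h.2.symm⟩
          have hstep : pvStepA (kw, cur, some lbl) p = (kw ++ [(String.ofList cur, lbl)], [], none) := by
            simp [pvStepA, hB, hcur, hnotI]
          have hspan : pvSpanB lbl (p :: rest) = ([], p :: rest) := by
            simp [pvSpanB, hI]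
          rw [List.foldl_cons, hstep, ihn _, hspan]
          rw [pvGoB]
          simp [hB]

-- ===== VERDICT (by name: the statement is the Claim_ definition above) =====
theorem restore_keywords_from_query_spec : Claim_equal_restore_keywords_from_query := by
  intro query slots _ _
  unfold Spec_restore_keywords_from_query restore_keywords_from_query restore_keywords_from_query_alt
  exact (pvMain _).1 []
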